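-- pv_equiv track=rewrite | github.com/duffyishere/problem-solving | python/boj_2138.py | solve
-- ===== SOURCE A (Python) =====
-- INF = 10**9
--
-- def solve(n, arr, t):
--     def press(arr, i):
--         for j in (i - 1, i, i + 1):
--             if 0 <= j < len(arr):
--                 arr[j] ^= 1
--
--     def simulate(press_first_switch):
--         a = arr[:]
--         cnt = 0
--         if press_first_switch:
--             press(a, 0)
--             cnt += 1
--
--         for i in range(1, n):
--             if a[i - 1] != t[i - 1]:
--                 press(a, i)
--                 cnt += 1
--
--         if a[-1] != t[-1]:
--             cnt += 1
--
--         return cnt if a == t else INF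
--
--     ans = min(simulate(True), simulate(False))
--     return ans if ans != INF else -1
-- ===== SOURCE B (Python) =====
-- INF = 10 ** 9
--
-- def solve(n, arr, t):
--     def attempt(first):
--         # one greedy pass: decide each press from the two previous decisions only
--         p = [1 if first else 0]
--         for i in range(1, n):
--             prev2 = p[-2] if len(p) >= 2 else 0
--             if arr[i - 1] ^ prev2 ^ p[-1] == t[i - 1]:
--                 p.append(0)
--             else:
--                 p.append(1)
--         # bulb j is toggled once for every pressed switch among j-1, j, j+1
--         lit = [a ^ (sum(p[max(j - 1, 0):j + 2]) & 1) for j, a in enumerate(arr)]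
--         return sum(p) if lit == t else INF
--
--     ans = min(attempt(True), attempt(False))
--     return ans if ans != INF else -1
-- ===== Notes on version B (the rewrite author's own statement) =====
-- stated objective: alternative
-- what changed: B never simulates the bulb array: A copies arr and mutates it in place with a three-index press helper inside the loop, while B records only the press-decision list (each decision computed from the two previous decisions by XOR), then verifies success by comparing the derived final pattern arr[j] ^ parity(p[j-1:j+2]) against t, the answer being sum(p); Pre_ excludes only the inputs on which A raises IndexError (empty arr or t, or n exceeding a list length + 1).
import Mathlib
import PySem

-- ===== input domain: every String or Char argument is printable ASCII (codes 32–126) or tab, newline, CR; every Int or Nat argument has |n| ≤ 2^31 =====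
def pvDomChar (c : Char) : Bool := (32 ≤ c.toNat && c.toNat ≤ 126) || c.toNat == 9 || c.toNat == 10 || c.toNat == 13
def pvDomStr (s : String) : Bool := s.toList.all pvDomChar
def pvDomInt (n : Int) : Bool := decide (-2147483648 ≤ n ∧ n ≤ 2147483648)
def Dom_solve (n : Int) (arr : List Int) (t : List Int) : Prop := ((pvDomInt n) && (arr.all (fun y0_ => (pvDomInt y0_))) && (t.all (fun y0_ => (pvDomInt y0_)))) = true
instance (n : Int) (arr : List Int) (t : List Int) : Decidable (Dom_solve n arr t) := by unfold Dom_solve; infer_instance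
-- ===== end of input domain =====

-- B replaces A's copied-and-mutated bulb array by a press-decision list built
-- with a two-decision look-back, verified against t through a parity formula
-- (alternative decomposition, same asymptotic cost).

-- ===== PORT A =====

-- one iteration of press's inner for-loop: 'if 0 <= j < len(arr): arr[j] ^= 1'
def pressStep (a : List Int) (j : Int) : List Int :=
  if 0 ≤ j ∧ j < (a.length : Int) then
    PySem.List.pySetD a j (PySem.Int.bxor (PySem.List.pyGetD a j 0) 1)
  else a

-- press(arr, i): for j in (i-1, i, i+1): ...
def press (a : List Int) (i : Int) : List Int :=
  [i - 1, i, i + 1].foldl pressStep a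

-- body of simulate's for-loop, state (a, cnt)
def simStep (t : List Int) (s : List Int × Int) (i : Int) : List Int × Int :=
  if PySem.List.pyGetD s.1 (i - 1) 0 ≠ PySem.List.pyGetD t (i - 1) 0 then
    (press s.1 i, s.2 + 1)
  else s

def simulate (n : Int) (arr t : List Int) (pressFirstSwitch : Bool) : Int :=
  let s0 : List Int × Int := if pressFirstSwitch then (press arr 0, 1) else (arr, 0)
  let s := (PySem.List.pyRange 1 n 1).foldl (simStep t) s0
  let cnt := if PySem.List.pyGetD s.1 (-1) 0 ≠ PySem.List.pyGetD t (-1) 0 then s.2 + 1 else s.2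
  if s.1 = t then cnt else 1000000000

def solve (n : Int) (arr : List Int) (t : List Int) : Int :=
  let ans := min (simulate n arr t true) (simulate n arr t false)
  if ans ≠ 1000000000 then ans else -1

-- ===== PORT B =====

-- body of attempt's for-loop: append the next press decision to p
def attemptStep (arr t : List Int) (p : List Int) (i : Int) : List Int :=
  let prev2 : Int := if 2 ≤ p.length then PySem.List.pyGetD p (-2) 0 else 0
  if PySem.Int.bxor (PySem.Int.bxor (PySem.List.pyGetD arr (i - 1) 0) prev2)
      (PySem.List.pyGetD p (-1) 0) = PySem.List.pyGetD t (i - 1) 0 then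
    p ++ [0]
  else p ++ [1]

def attempt (n : Int) (arr t : List Int) (first : Bool) : Int :=
  let p := (PySem.List.pyRange 1 n 1).foldl (attemptStep arr t) [if first then 1 else 0]
  let lit := (PySem.List.enumerate arr 0).map (fun q =>
    PySem.Int.bxor q.2 (PySem.Int.band
      (PySem.List.slice p (some (max (q.1 - 1) 0)) (some (q.1 + 2))).sum 1))
  if lit = t then p.sum else 1000000000

def solve_alt (n : Int) (arr : List Int) (t : List Int) : Int :=
  let ans := min (attempt n arr t true) (attempt n arr t false)
  if ans ≠ 1000000000 then ans else -1

-- ===== PRECONDITION & SPEC =====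

-- Pre_ excludes exactly the inputs where A raises IndexError: an empty arr or t
-- (a[-1]/t[-1]) or n exceeding a list length + 1 (a[i-1]/t[i-1] in the loop).
def Pre_solve (n : Int) (arr : List Int) (t : List Int) : Prop :=
  arr ≠ [] ∧ t ≠ [] ∧ n ≤ (arr.length : Int) + 1 ∧ n ≤ (t.length : Int) + 1
instance (n : Int) (arr : List Int) (t : List Int) : Decidable (Pre_solve n arr t) := by
  unfold Pre_solve; infer_instance

def pvWitness_solve : Int × List Int × List Int := (3, [0, 1, 0], [1, 0, 0])

def Spec_solve (n : Int) (arr : List Int) (t : List Int) (out : Int) : Prop := out = solve_alt n arr t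
instance (n : Int) (arr : List Int) (t : List Int) (out : Int) : Decidable (Spec_solve n arr t out) := by unfold Spec_solve; infer_instance

-- ===== CLAIM (what is proved, stated in full; the proofs are below) =====
def Claim_equal_solve : Prop := ∀ (n : Int) (arr : List Int) (t : List Int), Dom_solve n arr t → Pre_solve n arr t → Spec_solve n arr t (solve n arr t)

-- ===== LEMMAS AND PROOFS =====

-- the decision p[k] seen as a toggle bit; 0 outside the decision list
def gBit (p : List Int) (k : Int) : Int := if 0 ≤ k then p.getD k.toNat 0 else 0

-- number of pressed switches adjacent to bulb j
def sTog (p : List Int) (j : Nat) : Int :=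
  gBit p ((j : Int) - 1) + gBit p (j : Int) + gBit p ((j : Int) + 1)

-- joint invariant: A's simulated array is arr XOR the parity of B's decisions
def PInv (arr : List Int) (m : Nat) (sA : List Int × Int) (p : List Int) : Prop :=
  p.length = m ∧ (∀ x ∈ p, x = 0 ∨ x = 1) ∧ sA.2 = p.sum ∧ sA.1.length = arr.length ∧
  ∀ j : Nat, j < arr.length →
    sA.1.getD j 0 = PySem.Int.bxor (arr.getD j 0) (PySem.Int.band (sTog p j) 1)

theorem bxor_one_one (x : Int) : PySem.Int.bxor (PySem.Int.bxor x 1) 1 = x := by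
  by_cases hx : 0 ≤ x
  · have h1 : PySem.Int.bxor x 1 = ((x.toNat ^^^ 1 : Nat) : Int) := by
      unfold PySem.Int.bxor
      rw [if_pos hx, if_pos (by norm_num : (0:Int) ≤ 1)]
      norm_num
    have h2 : PySem.Int.bxor ((x.toNat ^^^ 1 : Nat) : Int) 1
        = (((x.toNat ^^^ 1) ^^^ 1 : Nat) : Int) := by
      unfold PySem.Int.bxor
      rw [if_pos (Int.natCast_nonneg _), if_pos (by norm_num : (0:Int) ≤ 1)]
      norm_num
    rw [h1, h2, Nat.xor_assoc, Nat.xor_self, Nat.xor_zero]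
    omega
  · have h1 : PySem.Int.bxor x 1 = -(((-x - 1).toNat ^^^ 1 : Nat) : Int) - 1 := by
      unfold PySem.Int.bxor
      rw [if_neg hx, if_pos (by norm_num : (0:Int) ≤ 1)]
      norm_num
    have h2 : PySem.Int.bxor (-(((-x - 1).toNat ^^^ 1 : Nat) : Int) - 1) 1
        = -((((-x - 1).toNat ^^^ 1) ^^^ 1 : Nat) : Int) - 1 := by
      unfold PySem.Int.bxor
      rw [if_neg (by omega : ¬ (0:Int) ≤ -(((-x - 1).toNat ^^^ 1 : Nat) : Int) - 1),
          if_pos (by norm_num : (0:Int) ≤ 1)]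
      have he : -(-(((-x - 1).toNat ^^^ 1 : Nat) : Int) - 1) - 1 = (((-x - 1).toNat ^^^ 1 : Nat) : Int) := by ring
      rw [he]
      norm_num
    rw [h1, h2, Nat.xor_assoc, Nat.xor_self, Nat.xor_zero]
    omega

theorem bxor_bits (x b c : Int) (hb : b = 0 ∨ b = 1) (hc : c = 0 ∨ c = 1) :
    PySem.Int.bxor (PySem.Int.bxor x b) c = PySem.Int.bxor x (PySem.Int.band (b + c) 1) := by
  rcases hb with rfl | rfl <;> rcases hc with rfl | rfl <;>
    norm_num [bxor_one_one, (by decide : PySem.Int.band 0 1 = 0),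
      (by decide : PySem.Int.band 1 1 = 1), (by decide : PySem.Int.band 2 1 = 0)]

theorem band_succ_bits (s : Int) (hs : s = 0 ∨ s = 1 ∨ s = 2 ∨ s = 3) :
    PySem.Int.band (PySem.Int.band s 1 + 1) 1 = PySem.Int.band (s + 1) 1 := by
  rcases hs with rfl | rfl | rfl | rfl <;> decide

theorem gBit_natCast (p : List Int) (k : Nat) : gBit p (k : Int) = p.getD k 0 := by
  unfold gBit
  rw [if_pos (Int.natCast_nonneg _), Int.toNat_natCast]

theorem gBit_bit (p : List Int) (hp : ∀ x ∈ p, x = 0 ∨ x = 1) (k : Int) :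
    gBit p k = 0 ∨ gBit p k = 1 := by
  unfold gBit
  split
  · by_cases hk : k.toNat < p.length
    · rw [List.getD_eq_getElem p 0 hk]
      exact hp _ (List.getElem_mem hk)
    · rw [List.getD_eq_default p 0 (by omega)]
      exact Or.inl rfl
  · exact Or.inl rfl

theorem gBit_ge (p : List Int) (k : Int) (h : (p.length : Int) ≤ k) : gBit p k = 0 := by
  unfold gBit
  rw [if_pos (by omega), List.getD_eq_default p 0 (by omega)]

theorem sTog_cases (p : List Int) (hp : ∀ x ∈ p, x = 0 ∨ x = 1) (j : Nat) :
    sTog p j = 0 ∨ sTog p j = 1 ∨ sTog p j = 2 ∨ sTog p j = 3 := by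
  unfold sTog
  rcases gBit_bit p hp ((j : Int) - 1) with h1 | h1 <;>
    rcases gBit_bit p hp (j : Int) with h2 | h2 <;>
      rcases gBit_bit p hp ((j : Int) + 1) with h3 | h3 <;>
        rw [h1, h2, h3] <;> norm_num

theorem band1_bit (s : Int) (hs : s = 0 ∨ s = 1 ∨ s = 2 ∨ s = 3) :
    PySem.Int.band s 1 = 0 ∨ PySem.Int.band s 1 = 1 := by
  rcases hs with rfl | rfl | rfl | rfl <;> decide

theorem gBit_append (p : List Int) (c : Int) (k : Int) :
    gBit (p ++ [c]) k = if k = (p.length : Int) then c else gBit p k := by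
  unfold gBit
  by_cases hk : 0 ≤ k
  · rw [if_pos hk]
    by_cases hkl : k.toNat < p.length
    · rw [List.getD_append _ _ _ _ hkl, if_neg (by omega), if_pos hk]
    · by_cases hke : k.toNat = p.length
      · rw [if_pos (by omega), List.getD_append_right _ _ _ _ (by omega), hke]
        simp
      · rw [if_neg (by omega), if_pos hk,
            List.getD_eq_default (p ++ [c]) 0 (by simp; omega),
            List.getD_eq_default p 0 (by omega)]
  · rw [if_neg (by omega : ¬ k = (p.length : Int)), if_neg hk, if_neg hk]

theorem sTog_append_zero (p : List Int) (j : Nat) : sTog (p ++ [0]) j = sTog p j := by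
  unfold sTog
  rw [gBit_append, gBit_append, gBit_append]
  have h0 : ∀ k : Int, k = (p.length : Int) → gBit p k = 0 := by
    intro k hk; exact gBit_ge p k (by omega)
  by_cases h1 : (j : Int) - 1 = (p.length : Int)
  · rw [if_pos h1, if_neg (by omega), if_neg (by omega), h0 _ h1]
  · by_cases h2 : (j : Int) = (p.length : Int)
    · rw [if_neg h1, if_pos h2, if_neg (by omega), h0 _ h2]
    · by_cases h3 : (j : Int) + 1 = (p.length : Int)
      · rw [if_neg h1, if_neg h2, if_pos h3, h0 _ h3]
      · rw [if_neg h1, if_neg h2, if_neg h3]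

theorem sTog_append_one (p : List Int) (j : Nat) :
    sTog (p ++ [1]) j =
      if (j : Int) = (p.length : Int) - 1 ∨ (j : Int) = (p.length : Int) ∨
          (j : Int) = (p.length : Int) + 1
      then sTog p j + 1 else sTog p j := by
  unfold sTog
  rw [gBit_append, gBit_append, gBit_append]
  by_cases h1 : (j : Int) - 1 = (p.length : Int)
  · have hg : gBit p ((j : Int) - 1) = 0 := gBit_ge p _ (by omega)
    rw [if_pos h1, if_neg (by omega), if_neg (by omega),
        if_pos (by omega), hg]
    omega
  · by_cases h2 : (j : Int) = (p.length : Int)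
    · have hg : gBit p (j : Int) = 0 := gBit_ge p _ (by omega)
      rw [if_neg h1, if_pos h2, if_neg (by omega), if_pos (by omega), hg]
      omega
    · by_cases h3 : (j : Int) + 1 = (p.length : Int)
      · have hg : gBit p ((j : Int) + 1) = 0 := gBit_ge p _ (by omega)
        rw [if_neg h1, if_neg h2, if_pos h3, if_pos (by omega), hg]
        omega
      · rw [if_neg h1, if_neg h2, if_neg h3, if_neg (by omega)]

theorem length_pressStep (a : List Int) (j : Int) : (pressStep a j).length = a.length := by
  unfold pressStep
  split <;> simp [PySem.List.length_pySetD]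

theorem pressStep_getD (a : List Int) (j : Int) (k : Nat) (hk : k < a.length) :
    (pressStep a j).getD k 0 =
      if (k : Int) = j then PySem.Int.bxor (a.getD k 0) 1 else a.getD k 0 := by
  unfold pressStep
  split
  · rename_i hj
    rw [PySem.List.pySetD_of_nonneg _ _ hj.1,
        PySem.List.pyGetD_eq_getElem _ _ hj.1 hj.2]
    have hlen2 : k < (a.set j.toNat (PySem.Int.bxor a[j.toNat] 1)).length := by simpa using hk
    rw [List.getD_eq_getElem _ _ hlen2, List.getElem_set]
    by_cases hkj : (k : Int) = j
    · rw [if_pos (by omega : j.toNat = k), if_pos hkj, List.getD_eq_getElem a 0 hk]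
      simp only [show j.toNat = k from by omega]
    · rw [if_neg (by omega : ¬ j.toNat = k), if_neg hkj, List.getD_eq_getElem a 0 hk]
  · rename_i hj
    rw [if_neg (by omega : ¬ (k : Int) = j)]

theorem length_press (a : List Int) (i : Int) : (press a i).length = a.length := by
  simp [press, List.foldl, length_pressStep]

theorem press_getD (a : List Int) (i : Int) (k : Nat) (hk : k < a.length) :
    (press a i).getD k 0 =
      if (k : Int) = i - 1 ∨ (k : Int) = i ∨ (k : Int) = i + 1 then
        PySem.Int.bxor (a.getD k 0) 1
      else a.getD k 0 := by
  have h1 : (pressStep a (i-1)).length = a.length := length_pressStep a (i-1)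
  have h2 : (pressStep (pressStep a (i-1)) i).length = a.length := by
    rw [length_pressStep, h1]
  simp only [press, List.foldl]
  rw [pressStep_getD _ _ _ (by omega : k < (pressStep (pressStep a (i-1)) i).length),
      pressStep_getD _ _ _ (by omega : k < (pressStep a (i-1)).length),
      pressStep_getD _ _ _ hk]
  split_ifs <;> first | rfl | omega

theorem inv_base (arr : List Int) (first : Bool) :
    PInv arr 1 (if first then (press arr 0, (1:Int)) else (arr, 0))
      [if first then (1:Int) else 0] := by
  cases first
  · simp only [Bool.false_eq_true, if_false]
    refine ⟨rfl, by intro x hx; simp at hx; exact Or.inl hx, by simp, rfl, ?_⟩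
    intro j hj
    have hz : sTog [(0:Int)] j = 0 := by
      unfold sTog
      have hg : ∀ k : Int, gBit [(0:Int)] k = 0 := by
        intro k
        unfold gBit
        split
        · rcases hkn : k.toNat with _ | n <;> rfl
        · rfl
      rw [hg, hg, hg]
      norm_num
    rw [hz]
    norm_num [(by decide : PySem.Int.band 0 1 = 0)]
  · simp only [if_true]
    refine ⟨rfl, by intro x hx; simp at hx; exact Or.inr hx, by simp, length_press arr 0, ?_⟩
    intro j hj
    rw [press_getD arr 0 j hj]
    have hone : ∀ k : Int, 1 ≤ k → gBit [(1:Int)] k = 0 := by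
      intro k hk; exact gBit_ge _ _ (by simp; omega)
    by_cases hj0 : j = 0
    · subst hj0
      rw [if_pos (by norm_num), (by decide : sTog [(1:Int)] 0 = 1),
          (by decide : PySem.Int.band 1 1 = 1)]
    · by_cases hj1 : j = 1
      · subst hj1
        rw [if_pos (by norm_num), (by decide : sTog [(1:Int)] 1 = 1),
            (by decide : PySem.Int.band 1 1 = 1)]
      · have hz : sTog [(1:Int)] j = 0 := by
          unfold sTog
          rw [hone _ (by omega), hone _ (by omega), hone _ (by omega)]
          norm_num
        rw [if_neg (by omega), hz]
        norm_num [(by decide : PySem.Int.band 0 1 = 0)]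

theorem step_pres (arr t : List Int) (m : Nat) (hm1 : 1 ≤ m) (hmA : m ≤ arr.length)
    (sA : List Int × Int) (p : List Int) (h : PInv arr m sA p) :
    PInv arr (m + 1) (simStep t sA (m : Int)) (attemptStep arr t p (m : Int)) := by
  obtain ⟨hplen, hbits, hsum, halen, hbulb⟩ := h
  have hidx : ((m : Int) - 1) = ((m - 1 : Nat) : Int) := by omega
  have haread : PySem.List.pyGetD sA.1 ((m : Int) - 1) 0
      = PySem.Int.bxor (arr.getD (m - 1) 0) (PySem.Int.band (sTog p (m - 1)) 1) := by
    rw [hidx, PySem.List.pyGetD_natCast]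
    exact hbulb (m - 1) (by omega)
  have htread : PySem.List.pyGetD t ((m : Int) - 1) 0 = t.getD (m - 1) 0 := by
    rw [hidx, PySem.List.pyGetD_natCast]
  have harr : PySem.List.pyGetD arr ((m : Int) - 1) 0 = arr.getD (m - 1) 0 := by
    rw [hidx, PySem.List.pyGetD_natCast]
  -- B's two look-back reads are gBit values
  have hlast : PySem.List.pyGetD p (-1) 0 = gBit p ((m : Int) - 1) := by
    rw [PySem.List.pyGetD_neg_ofNat p 1 0 (by omega) (by omega), hidx, gBit_natCast,
        ← List.getD_eq_getElem p 0 (by omega : p.length - 1 < p.length), hplen]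
  have hprev2 : (if 2 ≤ p.length then PySem.List.pyGetD p (-2) 0 else 0)
      = gBit p ((m : Int) - 2) := by
    by_cases hm2 : 2 ≤ m
    · rw [if_pos (by omega),
          PySem.List.pyGetD_neg_ofNat p 2 0 (by omega) (by omega),
          (by omega : ((m : Int) - 2) = ((m - 2 : Nat) : Int)), gBit_natCast,
          ← List.getD_eq_getElem p 0 (by omega : p.length - 2 < p.length), hplen]
    · rw [if_neg (by omega)]
      unfold gBit
      rw [if_neg (by omega)]
  have hgm : gBit p (m : Int) = 0 := gBit_ge p _ (by omega)
  have hstog : sTog p (m - 1)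
      = gBit p ((m : Int) - 2) + gBit p ((m : Int) - 1) := by
    unfold sTog
    rw [(by omega : ((m - 1 : Nat) : Int) - 1 = (m : Int) - 2),
        (by omega : ((m - 1 : Nat) : Int) = (m : Int) - 1),
        (by omega : ((m : Int) - 1) + 1 = (m : Int)), hgm]
    ring
  have hb2 := gBit_bit p hbits ((m : Int) - 2)
  have hb1 := gBit_bit p hbits ((m : Int) - 1)
  have hBexpr : PySem.Int.bxor
      (PySem.Int.bxor (PySem.List.pyGetD arr ((m : Int) - 1) 0)
        (if 2 ≤ p.length then PySem.List.pyGetD p (-2) 0 else 0))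
      (PySem.List.pyGetD p (-1) 0)
      = PySem.List.pyGetD sA.1 ((m : Int) - 1) 0 := by
    rw [harr, hprev2, hlast, haread, hstog, bxor_bits _ _ _ hb2 hb1]
  unfold simStep attemptStep
  simp only [hBexpr]
  by_cases hcond : PySem.List.pyGetD sA.1 ((m : Int) - 1) 0
      = PySem.List.pyGetD t ((m : Int) - 1) 0
  · rw [if_neg (by simpa using hcond), if_pos hcond]
    refine ⟨by simp [hplen], ?_, by simp [hsum], halen, ?_⟩
    · intro x hx
      rcases List.mem_append.mp hx with hx | hx
      · exact hbits x hx
      · simp at hx; exact Or.inl hx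
    · intro j hj
      rw [sTog_append_zero]
      exact hbulb j hj
  · rw [if_pos (by simpa using hcond), if_neg hcond]
    refine ⟨by simp [hplen], ?_, by simp [hsum], by simpa [length_press] using halen, ?_⟩
    · intro x hx
      rcases List.mem_append.mp hx with hx | hx
      · exact hbits x hx
      · simp at hx; exact Or.inr hx
    · intro j hj
      rw [sTog_append_one, hplen]
      have hsc := sTog_cases p hbits j
      have hbd := band1_bit _ hsc
      rw [press_getD sA.1 (m : Int) j (by omega), hbulb j hj]
      by_cases hin : (j : Int) = (m : Int) - 1 ∨ (j : Int) = (m : Int) ∨ (j : Int) = (m : Int) + 1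
      · rw [if_pos hin, if_pos hin, bxor_bits _ _ 1 hbd (Or.inr rfl),
            band_succ_bits _ hsc]
      · rw [if_neg hin, if_neg hin]

theorem loop_inv (arr t : List Int) (first : Bool) :
    ∀ m : Nat, 1 ≤ m → m ≤ arr.length + 1 →
    PInv arr m
      ((PySem.List.pyRange 1 (m : Int) 1).foldl (simStep t)
        (if first then (press arr 0, (1:Int)) else (arr, 0)))
      ((PySem.List.pyRange 1 (m : Int) 1).foldl (attemptStep arr t)
        [if first then (1:Int) else 0]) := by
  intro m
  induction m with
  | zero => intro h; omega
  | succ m ih =>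
    intro _ hmA
    by_cases hm : 1 ≤ m
    · have hrange : PySem.List.pyRange 1 ((m + 1 : Nat) : Int) 1
          = PySem.List.pyRange 1 (m : Int) 1 ++ [(m : Int)] := by
        push_cast
        exact PySem.List.pyRange_one_succ_right (by exact_mod_cast hm)
      rw [hrange, List.foldl_append, List.foldl_append]
      simp only [List.foldl]
      exact step_pres arr t m hm (by omega) _ _ (ih hm (by omega))
    · have hm0 : m = 0 := by omega
      subst hm0
      have hnil : PySem.List.pyRange 1 ((0 + 1 : Nat) : Int) 1 = [] :=
        PySem.List.pyRange_one_eq_nil (by norm_num)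
      rw [hnil]
      simpa using inv_base arr first

theorem sum_take_succ_getD (q : List Int) (k : Nat) :
    (q.take (k + 1)).sum = (q.take k).sum + q.getD k 0 := by
  induction q generalizing k with
  | nil => simp [List.getD]
  | cons a q ih =>
    cases k with
    | zero => simp [List.getD]
    | succ k =>
      simp only [List.take_succ_cons, List.sum_cons, ih, List.getD_cons_succ]
      ring

theorem getD_drop (q : List Int) (a k : Nat) :
    (q.drop a).getD k 0 = q.getD (a + k) 0 := by
  rw [List.getD_eq_getElem?_getD, List.getD_eq_getElem?_getD, List.getElem?_drop]

theorem sum_take2 (q : List Int) : (q.take 2).sum = q.getD 0 0 + q.getD 1 0 := by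
  rw [(by norm_num : (2 : Nat) = 1 + 1), sum_take_succ_getD,
      (by norm_num : (1 : Nat) = 0 + 1), sum_take_succ_getD]
  simp

theorem sum_take3 (q : List Int) :
    (q.take 3).sum = q.getD 0 0 + q.getD 1 0 + q.getD 2 0 := by
  rw [(by norm_num : (3 : Nat) = 2 + 1), sum_take_succ_getD, sum_take2]

theorem slice_sum_sTog (p : List Int) (j : Nat) :
    (PySem.List.slice p (some (max ((j : Int) - 1) 0)) (some ((j : Int) + 2))).sum
      = sTog p j := by
  by_cases hj0 : j = 0
  · subst hj0
    simp only [Nat.cast_zero]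
    rw [(by norm_num : max ((0 : Int) - 1) 0 = 0), (by norm_num : (0 : Int) + 2 = 2),
        PySem.List.slice_zero_start,
        (by norm_num : (2 : Int) = ((2 : Nat) : Int)), PySem.List.slice_to_natCast,
        sum_take2]
    unfold sTog
    simp only [Nat.cast_zero]
    have hgm1 : gBit p ((0 : Int) - 1) = 0 := by unfold gBit; norm_num
    have hg0 : gBit p (0 : Int) = p.getD 0 0 := by unfold gBit; norm_num
    have hg1 : gBit p ((0 : Int) + 1) = p.getD 1 0 := by unfold gBit; norm_num
    rw [hgm1, hg0, hg1]
    omega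
  · have hj1 : 1 ≤ j := by omega
    have hmax : max ((j : Int) - 1) 0 = ((j - 1 : Nat) : Int) := by
      rw [max_eq_left (by omega)]; omega
    have hcast2 : (j : Int) + 2 = ((j + 2 : Nat) : Int) := by push_cast; ring
    rw [hmax, hcast2, PySem.List.slice_natCast,
        (by omega : j + 2 - (j - 1) = 3), sum_take3,
        getD_drop, getD_drop, getD_drop,
        (by omega : j - 1 + 0 = j - 1), (by omega : j - 1 + 1 = j),
        (by omega : j - 1 + 2 = j + 1)]
    unfold sTog
    rw [(by omega : (j : Int) - 1 = ((j - 1 : Nat) : Int)), gBit_natCast,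
        (by push_cast; ring : (j : Int) + 1 = ((j + 1 : Nat) : Int)), gBit_natCast,
        gBit_natCast]

theorem getD_ext (a b : List Int) (hlen : a.length = b.length)
    (h : ∀ k : Nat, k < a.length → a.getD k 0 = b.getD k 0) : a = b := by
  apply List.ext_getElem hlen
  intro k h1 h2
  have hx := h k h1
  rwa [List.getD_eq_getElem a 0 h1, List.getD_eq_getElem b 0 h2] at hx

theorem sim_eq_attempt (n : Int) (arr t : List Int) (first : Bool)
    (hpre : Pre_solve n arr t) : simulate n arr t first = attempt n arr t first := by
  obtain ⟨-, -, hna, -⟩ := hpre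
  set M : Nat := if n ≤ 1 then 1 else n.toNat with hM
  have hM1 : 1 ≤ M := by
    by_cases h : n ≤ 1 <;> simp [hM, h] <;> omega
  have hMn : PySem.List.pyRange 1 n 1 = PySem.List.pyRange 1 (M : Int) 1 := by
    by_cases h : n ≤ 1
    · rw [PySem.List.pyRange_one_eq_nil h, hM, if_pos h,
        PySem.List.pyRange_one_eq_nil (by norm_num)]
    · rw [hM, if_neg h]
      congr 1
      omega
  have hMA : M ≤ arr.length + 1 := by
    by_cases h : n ≤ 1 <;> simp [hM, h] <;> omega
  have hinv := loop_inv arr t first M hM1 hMA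
  obtain ⟨hplen, hbits, hsum, halen, hbulb⟩ := hinv
  unfold simulate attempt
  simp only [hMn]
  set sA := (PySem.List.pyRange 1 (M : Int) 1).foldl (simStep t)
    (if first then (press arr 0, (1:Int)) else (arr, 0)) with hsA
  set p := (PySem.List.pyRange 1 (M : Int) 1).foldl (attemptStep arr t)
    [if first then (1:Int) else 0] with hp
  have hlit : (PySem.List.enumerate arr 0).map (fun q =>
      PySem.Int.bxor q.2 (PySem.Int.band
        (PySem.List.slice p (some (max (q.1 - 1) 0)) (some (q.1 + 2))).sum 1)) = sA.1 := by
    apply getD_ext _ _ (by rw [List.length_map, PySem.List.length_enumerate, halen])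
    intro k hk
    have hk' : k < arr.length := by
      rwa [List.length_map, PySem.List.length_enumerate] at hk
    rw [List.getD_eq_getElem?_getD, List.getElem?_map, PySem.List.getElem?_enumerate,
        List.getElem?_eq_getElem hk']
    simp only [Option.map_some, Option.getD_some, zero_add]
    rw [slice_sum_sTog p k, hbulb k hk', List.getD_eq_getElem arr 0 hk']
  rw [hlit]
  by_cases heq : sA.1 = t
  · rw [if_pos heq, if_pos heq, heq, if_neg (fun h => h rfl)]
    exact hsum
  · rw [if_neg heq, if_neg heq]

-- ===== VERDICT (by name: the statement is the Claim_ definition above) =====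
theorem solve_spec : Claim_equal_solve := by
  intro n arr t _ hpre
  unfold Spec_solve solve solve_alt
  rw [sim_eq_attempt n arr t true hpre, sim_eq_attempt n arr t false hpre]
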